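-- pv_equiv track=rewrite | github.com/Ikerlb/aoc2015 | 5/sol.py | is_nice_p2
-- ===== SOURCE A (Python) =====
-- def window(s, k):
--     for i in range(len(s) - (k - 1)):
--         yield s[i:i + k]
--
-- def is_nice_p2(s):
--     prev = None
--     rep = set()
--     if not any(w[0] == w[-1] for w in window(s, 3)):
--         return False
--     d = {}
--     for i, w in enumerate(window(s, 2)):
--         if w in d and i - d[w] >= 2:
--             return True
--         elif w not in d:
--             d[w] = i
--     return False
-- ===== SOURCE B (Python) =====
-- def is_nice_p2(s):
--     n = len(s)
--     rule1 = any(s[i] == s[i + 2] for i in range(n - 2))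
--     rule2 = any(s[i] == s[j] and s[i + 1] == s[j + 1]
--                 for i in range(n - 1) for j in range(i + 2, n - 1))
--     return rule1 and rule2
-- ===== Notes on version B (the rewrite author's own statement) =====
-- stated objective: simpler
-- what changed: B drops A's slice-window generator and first-occurrence dictionary and checks the two rules directly as index comparisons: rule 1 by any(s[i]==s[i+2]) and rule 2 by a brute-force nested scan for a pair repeated at least two positions later.
import Mathlib
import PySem

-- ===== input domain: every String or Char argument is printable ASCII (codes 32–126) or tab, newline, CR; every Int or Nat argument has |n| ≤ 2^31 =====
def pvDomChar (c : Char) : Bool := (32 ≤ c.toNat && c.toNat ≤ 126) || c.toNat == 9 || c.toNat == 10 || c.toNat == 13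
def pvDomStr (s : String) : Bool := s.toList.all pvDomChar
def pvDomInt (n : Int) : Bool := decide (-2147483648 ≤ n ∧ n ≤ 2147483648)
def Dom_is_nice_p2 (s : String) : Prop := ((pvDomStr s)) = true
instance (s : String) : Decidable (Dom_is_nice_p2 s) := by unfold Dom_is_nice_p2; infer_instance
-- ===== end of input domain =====

-- B replaces A's first-occurrence dictionary pass by a direct nested-index scan for a
-- repeated non-overlapping pair (objective: simpler; not faster).

-- ===== PORT A =====

-- window(s, k): the list of slices s[i:i+k] for i in range(len(s)-(k-1))
def pvWindow (cs : List Char) (k : Int) : List (List Char) :=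
  (PySem.List.pyRange 0 ((cs.length : Int) - (k - 1)) 1).map
    (fun i => PySem.List.slice cs (some i) (some (i + k)))

-- the 'for i, w in enumerate(window(s, 2))' loop with the first-occurrence dict d
def pvALoop : List (Int × List Char) → PySem.Dict (List Char) Int → Bool
  | [], _ => false
  | (i, w) :: rest, d =>
    match d.get? w with
    | some j => if i - j ≥ 2 then true else pvALoop rest d
    | none => pvALoop rest (d.insert w i)

def is_nice_p2 (s : String) : Bool :=
  let cs := s.toList
  if !((pvWindow cs 3).any
        (fun w => PySem.List.pyGet? w 0 == PySem.List.pyGet? w (-1))) then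
    false
  else
    pvALoop (PySem.List.enumerate (pvWindow cs 2) 0) PySem.Dict.empty

-- ===== PORT B =====

def is_nice_p2_alt (s : String) : Bool :=
  let cs := s.toList
  let n : Int := cs.length
  let rule1 := (PySem.List.pyRange 0 (n - 2) 1).any
      (fun i => PySem.List.pyGet? cs i == PySem.List.pyGet? cs (i + 2))
  let rule2 := (PySem.List.pyRange 0 (n - 1) 1).any (fun i =>
      (PySem.List.pyRange (i + 2) (n - 1) 1).any (fun j =>
        (PySem.List.pyGet? cs i == PySem.List.pyGet? cs j) &&
        (PySem.List.pyGet? cs (i + 1) == PySem.List.pyGet? cs (j + 1))))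
  rule1 && rule2

-- ===== PRECONDITION & SPEC =====
def Spec_is_nice_p2 (s : String) (out : Bool) : Prop := out = is_nice_p2_alt s
instance (s : String) (out : Bool) : Decidable (Spec_is_nice_p2 s out) := by unfold Spec_is_nice_p2; infer_instance

-- ===== CLAIM (what is proved, stated in full; the proofs are below) =====
def Claim_equal_is_nice_p2 : Prop := ∀ (s : String), Dom_is_nice_p2 s → Spec_is_nice_p2 s (is_nice_p2 s)

-- ===== LEMMAS AND PROOFS =====

-- two / three consecutive characters, extracted from a drop/take slice
theorem pvDropTake2 (cs : List Char) (a : Nat) (h : a + 1 < cs.length) :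
    (cs.drop a).take 2 = [cs[a], cs[a+1]] := by
  rw [List.drop_eq_getElem_cons (show a < cs.length by omega),
      List.drop_eq_getElem_cons (show a + 1 < cs.length by omega)]
  rfl

theorem pvDropTake3 (cs : List Char) (a : Nat) (h : a + 2 < cs.length) :
    (cs.drop a).take 3 = [cs[a], cs[a+1], cs[a+2]] := by
  rw [List.drop_eq_getElem_cons (show a < cs.length by omega),
      List.drop_eq_getElem_cons (show a + 1 < cs.length by omega),
      List.drop_eq_getElem_cons (show a + 2 < cs.length by omega)]
  rfl

theorem pvWindow2_len (cs : List Char) :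
    (pvWindow cs 2).length = ((cs.length : Int) - 1).toNat := by
  simp [pvWindow, PySem.List.length_pyRange_one]

theorem pvWindow2_get (cs : List Char) (q : Nat) (h : q + 1 < cs.length) :
    (pvWindow cs 2)[q]? = some [cs[q], cs[q+1]] := by
  unfold pvWindow
  rw [List.getElem?_map, PySem.List.getElem?_pyRange_one]
  rw [if_pos (by omega)]
  have h2 : (0 : Int) + (q : Int) + 2 = ((q + 2 : Nat) : Int) := by push_cast; ring
  have h0 : (0 : Int) + (q : Int) = ((q : Nat) : Int) := by ring
  rw [Option.map_some]
  rw [h2, h0, PySem.List.slice_natCast]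
  have : q + 2 - q = 2 := by omega
  rw [this, pvDropTake2 cs q h]

-- the proposition both rule-2 computations decide
def pvQ (cs : List Char) : Prop :=
  ∃ p q : Nat, p + 2 ≤ q ∧ q + 1 < cs.length ∧ cs[p]? = cs[q]? ∧ cs[p+1]? = cs[q+1]?

-- region form of pvQ used by the loop invariant
def pvR (ws : List (List Char)) (k : Nat) : Prop :=
  ∃ p q : Nat, p + 2 ≤ q ∧ k ≤ q ∧ q < ws.length ∧ ws[p]? = ws[q]?

theorem pvALoop_iff (ws : List (List Char)) :
    ∀ (rest : List (List Char)) (k : Nat) (d : PySem.Dict (List Char) Int),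
    ws.drop k = rest →
    (∀ w j, d.get? w = some j → ∃ jn : Nat, j = (jn : Int) ∧ jn < k ∧ ws[jn]? = some w) →
    (∀ t : Nat, t < k → ∀ w, ws[t]? = some w → ∃ j : Int, d.get? w = some j ∧ j ≤ (t : Int)) →
    (pvALoop (PySem.List.enumerate rest (k : Int)) d = true ↔ pvR ws k) := by
  intro rest
  induction rest with
  | nil =>
    intro k d hdrop _ _
    have hlen : ws.length ≤ k := List.drop_eq_nil_iff.mp hdrop
    simp only [PySem.List.enumerate_nil, pvALoop, Bool.false_eq_true, false_iff]
    rintro ⟨p, q, _, h2, h3, _⟩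
    omega
  | cons w rest' ih =>
    intro k d hdrop hinv1 hinv2
    have hk : k < ws.length := by
      by_contra hc
      rw [List.drop_eq_nil_iff.mpr (by omega)] at hdrop
      exact List.cons_ne_nil _ _ hdrop.symm
    have hwk : ws[k]? = some w := by
      have h0 : (ws.drop k)[0]? = some w := by rw [hdrop]; rfl
      rwa [List.getElem?_drop, Nat.add_zero] at h0
    have hdrop' : ws.drop (k+1) = rest' := by
      have h1 : (ws.drop k).drop 1 = rest' := by rw [hdrop]; rfl
      rw [List.drop_drop] at h1
      exact h1
    rw [PySem.List.enumerate_cons]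
    have hcast : (k : Int) + 1 = ((k + 1 : Nat) : Int) := by push_cast; ring
    rw [hcast]
    cases hget : d.get? w with
    | some j =>
      obtain ⟨jn, rfl, hjk, hwj⟩ := hinv1 w j hget
      by_cases hge : (k : Int) - (jn : Int) ≥ 2
      · simp only [pvALoop, hget, if_pos hge, true_iff]
        exact ⟨jn, k, by omega, le_refl k, hk, by rw [hwj, hwk]⟩
      · simp only [pvALoop, hget, if_neg hge]
        have hi1 : ∀ w' j', d.get? w' = some j' → ∃ jn' : Nat, j' = (jn' : Int) ∧ jn' < k + 1 ∧ ws[jn']? = some w' := by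
          intro w' j' hg
          obtain ⟨jn', h1, h2, h3⟩ := hinv1 w' j' hg
          exact ⟨jn', h1, by omega, h3⟩
        have hi2 : ∀ t : Nat, t < k + 1 → ∀ w', ws[t]? = some w' → ∃ j' : Int, d.get? w' = some j' ∧ j' ≤ (t : Int) := by
          intro t ht w' hw'
          by_cases htk : t = k
          · rw [htk, hwk] at hw'
            injection hw' with hww
            subst hww
            exact ⟨(jn : Int), hget, by omega⟩
          · exact hinv2 t (by omega) w' hw'
        rw [ih (k+1) d hdrop' hi1 hi2]
        constructor
        · rintro ⟨p, q, h1, h2, h3, h4⟩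
          exact ⟨p, q, h1, by omega, h3, h4⟩
        · rintro ⟨p, q, h1, h2, h3, h4⟩
          by_cases hq : k + 1 ≤ q
          · exact ⟨p, q, h1, hq, h3, h4⟩
          · exfalso
            have hqk : q = k := by omega
            subst hqk
            rw [hwk] at h4
            obtain ⟨j', hj', hjle⟩ := hinv2 p (by omega) w h4
            rw [hget] at hj'
            injection hj' with hjj
            omega
    | none =>
      simp only [pvALoop, hget]
      have hi1 : ∀ w' j', (d.insert w (k : Int)).get? w' = some j' → ∃ jn' : Nat, j' = (jn' : Int) ∧ jn' < k + 1 ∧ ws[jn']? = some w' := by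
        intro w' j' hg
        rw [PySem.Dict.get?_insert] at hg
        by_cases hww : w' = w
        · rw [if_pos hww] at hg
          injection hg with hg
          exact ⟨k, hg.symm, by omega, by rw [hww, hwk]⟩
        · rw [if_neg hww] at hg
          obtain ⟨jn', h1, h2, h3⟩ := hinv1 w' j' hg
          exact ⟨jn', h1, by omega, h3⟩
      have hi2 : ∀ t : Nat, t < k + 1 → ∀ w', ws[t]? = some w' → ∃ j' : Int, (d.insert w (k : Int)).get? w' = some j' ∧ j' ≤ (t : Int) := by
        intro t ht w' hw'
        by_cases htk : t = k
        · rw [htk, hwk] at hw'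
          injection hw' with hww
          subst hww
          exact ⟨(k : Int), by rw [PySem.Dict.get?_insert, if_pos rfl], by omega⟩
        · obtain ⟨j', hj', hjle⟩ := hinv2 t (by omega) w' hw'
          refine ⟨j', ?_, hjle⟩
          rw [PySem.Dict.get?_insert, if_neg ?_, hj']
          intro hww
          rw [hww, hget] at hj'
          simp at hj'
      rw [ih (k+1) (d.insert w (k : Int)) hdrop' hi1 hi2]
      constructor
      · rintro ⟨p, q, h1, h2, h3, h4⟩
        exact ⟨p, q, h1, by omega, h3, h4⟩
      · rintro ⟨p, q, h1, h2, h3, h4⟩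
        by_cases hq : k + 1 ≤ q
        · exact ⟨p, q, h1, hq, h3, h4⟩
        · exfalso
          have hqk : q = k := by omega
          subst hqk
          rw [hwk] at h4
          obtain ⟨j', hj', _⟩ := hinv2 p (by omega) w h4
          rw [hget] at hj'
          simp at hj'
-- the A-side and B-side rule-1 checks compute the same Bool
theorem pvTripleCheck (cs : List Char) (i : Int) (h0 : 0 ≤ i) (h1 : i < (cs.length : Int) - 2) :
    (PySem.List.pyGet? (PySem.List.slice cs (some i) (some (i+3))) 0
      == PySem.List.pyGet? (PySem.List.slice cs (some i) (some (i+3))) (-1))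
    = (PySem.List.pyGet? cs i == PySem.List.pyGet? cs (i+2)) := by
  obtain ⟨a, rfl⟩ := Int.eq_ofNat_of_zero_le h0
  have ha : a + 2 < cs.length := by omega
  have hs : PySem.List.slice cs (some (a : Int)) (some ((a : Int) + 3)) = [cs[a], cs[a+1], cs[a+2]] := by
    have h3 : ((a : Int) + 3) = ((a + 3 : Nat) : Int) := by push_cast; ring
    rw [h3, PySem.List.slice_natCast, show a + 3 - a = 3 from by omega, pvDropTake3 cs a ha]
  have h2 : ((a : Int) + 2) = ((a + 2 : Nat) : Int) := by push_cast; ring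
  rw [hs, h2, PySem.List.pyGet?_natCast, PySem.List.pyGet?_natCast,
      PySem.List.pyGet?_zero_cons, PySem.List.pyGet?_neg_one]
  simp [ha, show a < cs.length from by omega]

theorem pvRule1_eq (cs : List Char) :
    ((pvWindow cs 3).any (fun w => PySem.List.pyGet? w 0 == PySem.List.pyGet? w (-1)))
    = ((PySem.List.pyRange 0 ((cs.length : Int) - 2) 1).any
        (fun i => PySem.List.pyGet? cs i == PySem.List.pyGet? cs (i + 2))) := by
  unfold pvWindow
  rw [show ((cs.length : Int) - (3 - 1)) = ((cs.length : Int) - 2) from by ring]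
  rw [List.any_map]
  rw [Bool.eq_iff_iff]
  simp only [List.any_eq_true, PySem.List.mem_pyRange_one, Function.comp]
  constructor
  · rintro ⟨i, ⟨hi0, hi1⟩, hp⟩
    exact ⟨i, ⟨hi0, hi1⟩, by rwa [pvTripleCheck cs i hi0 hi1] at hp⟩
  · rintro ⟨i, ⟨hi0, hi1⟩, hp⟩
    exact ⟨i, ⟨hi0, hi1⟩, by rwa [pvTripleCheck cs i hi0 hi1]⟩

theorem pvR_iff (cs : List Char) : pvR (pvWindow cs 2) 0 ↔ pvQ cs := by
  unfold pvR pvQ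
  constructor
  · rintro ⟨p, q, h1, _, h3, h4⟩
    rw [pvWindow2_len] at h3
    have hq : q + 1 < cs.length := by omega
    have hp : p + 1 < cs.length := by omega
    rw [pvWindow2_get cs q hq, pvWindow2_get cs p hp] at h4
    injection h4 with h4
    injection h4 with e1 h4
    injection h4 with e2 _
    refine ⟨p, q, h1, hq, ?_, ?_⟩ <;>
      simp [hp, hq, show p < cs.length from by omega,
            show q < cs.length from by omega, e1, e2]
  · rintro ⟨p, q, h1, h2, e1, e2⟩
    refine ⟨p, q, h1, Nat.zero_le _, by rw [pvWindow2_len]; omega, ?_⟩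
    rw [pvWindow2_get cs q h2, pvWindow2_get cs p (by omega)]
    have hp : p + 1 < cs.length := by omega
    simp only [List.getElem?_eq_getElem, hp, h2, show p < cs.length from by omega,
               show q < cs.length from by omega] at e1 e2
    injection e1 with e1
    injection e2 with e2
    rw [e1, e2]

theorem pvALoop_main (cs : List Char) :
    (pvALoop (PySem.List.enumerate (pvWindow cs 2) 0) PySem.Dict.empty = true) ↔ pvQ cs := by
  have h := pvALoop_iff (pvWindow cs 2) (pvWindow cs 2) 0 PySem.Dict.empty rfl
    (fun w j hg => by rw [PySem.Dict.get?_empty] at hg; simp at hg)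
    (fun t ht => by omega)
  rw [Nat.cast_zero] at h
  rw [h, pvR_iff]

theorem pvRule2_iff (cs : List Char) :
    (((PySem.List.pyRange 0 ((cs.length : Int) - 1) 1).any (fun i =>
        (PySem.List.pyRange (i + 2) ((cs.length : Int) - 1) 1).any (fun j =>
          (PySem.List.pyGet? cs i == PySem.List.pyGet? cs j) &&
          (PySem.List.pyGet? cs (i + 1) == PySem.List.pyGet? cs (j + 1))))) = true) ↔ pvQ cs := by
  simp only [List.any_eq_true, PySem.List.mem_pyRange_one, Bool.and_eq_true, beq_iff_eq]
  unfold pvQ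
  constructor
  · rintro ⟨i, ⟨hi0, hi1⟩, j, ⟨hj0, hj1⟩, e1, e2⟩
    obtain ⟨p, rfl⟩ := Int.eq_ofNat_of_zero_le hi0
    obtain ⟨q, rfl⟩ := Int.eq_ofNat_of_zero_le (show (0:Int) ≤ j from by omega)
    refine ⟨p, q, by omega, by omega, ?_, ?_⟩
    · rw [PySem.List.pyGet?_natCast, PySem.List.pyGet?_natCast] at e1
      exact e1
    · rw [show ((p : Int) + 1) = ((p + 1 : Nat) : Int) from by push_cast; ring,
          show ((q : Int) + 1) = ((q + 1 : Nat) : Int) from by push_cast; ring,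
          PySem.List.pyGet?_natCast, PySem.List.pyGet?_natCast] at e2
      exact e2
  · rintro ⟨p, q, h1, h2, e1, e2⟩
    refine ⟨(p : Int), ⟨by omega, by omega⟩, (q : Int), ⟨by omega, by omega⟩, ?_, ?_⟩
    · rw [PySem.List.pyGet?_natCast, PySem.List.pyGet?_natCast]
      exact e1
    · rw [show ((p : Int) + 1) = ((p + 1 : Nat) : Int) from by push_cast; ring,
          show ((q : Int) + 1) = ((q + 1 : Nat) : Int) from by push_cast; ring,
          PySem.List.pyGet?_natCast, PySem.List.pyGet?_natCast]
      exact e2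

-- ===== VERDICT (by name: the statement is the Claim_ definition above) =====
theorem is_nice_p2_spec : Claim_equal_is_nice_p2 := by
  intro s _
  unfold Spec_is_nice_p2 is_nice_p2 is_nice_p2_alt
  dsimp only
  rw [pvRule1_eq s.toList]
  cases hr : (PySem.List.pyRange 0 ((s.toList.length : Int) - 2) 1).any
      (fun i => PySem.List.pyGet? s.toList i == PySem.List.pyGet? s.toList (i + 2)) with
  | false => simp
  | true =>
    simp only [Bool.not_true, Bool.false_eq_true, if_false, Bool.true_and]
    rw [Bool.eq_iff_iff, pvALoop_main s.toList, pvRule2_iff s.toList]
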